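-- pv_equiv track=rewrite | github.com/arall/sigint | src/scanners/pocsag.py | decode_alpha_message
-- ===== SOURCE A (Python) =====
-- from typing import Optional, Dict, List, Tuple
--
-- POCSAG_IDLE = 0x7A89C197
--
-- def decode_alpha_message(codewords: List[int]) -> str:
--     """Decode alphanumeric POCSAG message from codewords."""
--     # POCSAG alphanumeric: 7-bit ASCII transmitted LSB first
--     # Data bits from each codeword are extracted LSB first (transmission order)
--     # Then 7-bit characters are decoded by reversing to MSB-first for ASCII
--     all_bits = []
--
--     for cw in codewords:
--         if cw == POCSAG_IDLE:
--             continue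
--         if cw & 0x80000000:  # Message codeword (bit 31 = 1)
--             # Extract 20 data bits (bits 30-11), LSB first
--             data = (cw >> 11) & 0xFFFFF
--             for i in range(20):
--                 all_bits.append((data >> i) & 1)
--
--     # Decode 7-bit ASCII characters
--     message = ""
--     for i in range(0, len(all_bits) - 6, 7):
--         # Bits are in LSB-first order; reverse to MSB-first for ASCII value
--         char_val = 0
--         for j in range(7):
--             char_val |= all_bits[i + j] << j
--         if char_val == 0:
--             break  # End of message / null terminator
--         if 32 <= char_val < 127:
--             message += chr(char_val)
--
--     return message.strip()
-- ===== SOURCE B (Python) =====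
-- from typing import List
--
-- POCSAG_IDLE = 0x7A89C197
--
-- def decode_alpha_message(codewords: List[int]) -> str:
--     """Decode alphanumeric POCSAG message from codewords (streaming bit buffer)."""
--     buf = 0      # pending data bits, LSB = oldest bit
--     cnt = 0      # number of pending bits (always < 7 between codewords)
--     chars = []
--     for cw in codewords:
--         if cw == POCSAG_IDLE or not (cw & 0x80000000):
--             continue
--         buf |= ((cw >> 11) & 0xFFFFF) << cnt
--         cnt += 20
--         while cnt >= 7:
--             ch = buf & 0x7F
--             buf >>= 7
--             cnt -= 7
--             if ch == 0:
--                 return ''.join(chars).strip()  # null terminator ends the message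
--             if 32 <= ch < 127:
--                 chars.append(chr(ch))
--     return ''.join(chars).strip()
-- ===== Notes on version B (the rewrite author's own statement) =====
-- stated objective: alternative
-- what changed: Replaced A's two-phase collect-then-regroup (materialize every data bit in a list, then re-scan it with an indexed stride-7 loop) with a single streaming pass that shifts each codeword's 20 data bits into an integer bit buffer and peels off 7-bit characters as soon as they are complete, returning early at the null terminator.
import Mathlib
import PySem

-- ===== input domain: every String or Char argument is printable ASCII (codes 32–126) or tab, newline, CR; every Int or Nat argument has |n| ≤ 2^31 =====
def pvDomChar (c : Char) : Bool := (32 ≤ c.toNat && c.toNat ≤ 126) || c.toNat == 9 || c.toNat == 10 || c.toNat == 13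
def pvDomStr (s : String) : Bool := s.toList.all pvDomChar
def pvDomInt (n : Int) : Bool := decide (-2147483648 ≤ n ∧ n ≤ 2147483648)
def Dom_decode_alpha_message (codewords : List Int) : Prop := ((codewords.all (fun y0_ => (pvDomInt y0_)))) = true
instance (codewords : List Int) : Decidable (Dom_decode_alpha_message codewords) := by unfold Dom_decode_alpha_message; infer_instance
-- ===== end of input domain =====

-- B replaces A's two-pass collect-all-bits-then-regroup with a single streaming pass that keeps
-- pending bits in an integer buffer and emits a character whenever 7 bits are available
-- (objective: alternative decomposition, same asymptotic cost, no materialized bit list).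

-- ===== PORT A =====
-- Python's `for i in range(0, len(all_bits) - 6, 7)` with `break` is ported as the obvious
-- structural recursion on the index; `all_bits[i+j]` is in range under the loop guard, so `getD`.
def pvLoopA (bits : List Int) (i : Nat) (msg : String) : String :=
  if _h : i + 7 ≤ bits.length then
    let char_val : Int := (List.range 7).foldl (fun cv (j : Nat) => PySem.Int.bor cv ((bits.getD (i + j) 0) <<< j)) 0
    if char_val = 0 then msg
    else pvLoopA bits (i + 7)
      (if 32 ≤ char_val ∧ char_val < 127 then msg.push (Char.ofNat char_val.toNat) else msg)
  else msg
termination_by bits.length - i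
decreasing_by omega

def decode_alpha_message (codewords : List Int) : String :=
  let all_bits : List Int := codewords.foldl (fun acc cw =>
    if cw = 2056634775 then acc
    else if PySem.Int.band cw 2147483648 ≠ 0 then
      acc ++ (List.range 20).map (fun (i : Nat) => PySem.Int.band ((PySem.Int.band (cw >>> 11) 1048575) >>> i) 1)
    else acc) []
  PySem.Str.strip (pvLoopA all_bits 0 "")

-- ===== PORT B =====
-- the inner `while cnt >= 7` drain; `Sum.inr` is B's early `return` on the null terminator
def pvDrainB (buf : Int) (cnt : Nat) (chars : List Char) : (Int × Nat × List Char) ⊕ List Char :=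
  if _h : 7 ≤ cnt then
    let ch : Int := PySem.Int.band buf 127
    let buf' : Int := buf >>> 7
    let cnt' : Nat := cnt - 7
    if ch = 0 then Sum.inr chars
    else pvDrainB buf' cnt' (if 32 ≤ ch ∧ ch < 127 then chars ++ [Char.ofNat ch.toNat] else chars)
  else Sum.inl (buf, cnt, chars)
termination_by cnt
decreasing_by omega

def pvGoB : List Int → Int → Nat → List Char → String
  | [], _, _, chars => PySem.Str.strip (String.ofList chars)
  | cw :: rest, buf, cnt, chars =>
    if cw = 2056634775 ∨ PySem.Int.band cw 2147483648 = 0 then pvGoB rest buf cnt chars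
    else
      match pvDrainB (PySem.Int.bor buf ((PySem.Int.band (cw >>> 11) 1048575) <<< cnt)) (cnt + 20) chars with
      | Sum.inl (buf', cnt', chars') => pvGoB rest buf' cnt' chars'
      | Sum.inr chars' => PySem.Str.strip (String.ofList chars')

def decode_alpha_message_alt (codewords : List Int) : String := pvGoB codewords 0 0 []

-- ===== PRECONDITION & SPEC =====
def Spec_decode_alpha_message (codewords : List Int) (out : String) : Prop := out = decode_alpha_message_alt codewords
instance (codewords : List Int) (out : String) : Decidable (Spec_decode_alpha_message codewords out) := by unfold Spec_decode_alpha_message; infer_instance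

-- ===== CLAIM (what is proved, stated in full; the proofs are below) =====
def Claim_equal_decode_alpha_message : Prop := ∀ (codewords : List Int), Dom_decode_alpha_message codewords → Spec_decode_alpha_message codewords (decode_alpha_message codewords)

-- ===== LEMMAS AND PROOFS =====

-- the 20 data bits of one message codeword, as port A lists them
def pvBits20 (cw : Int) : List Int :=
  (List.range 20).map (fun (i : Nat) => PySem.Int.band ((PySem.Int.band (cw >>> 11) 1048575) >>> i) 1)

-- all data bits of the transmission, in order
def pvAllBits (l : List Int) : List Int :=
  l.flatMap (fun cw => if cw = 2056634775 then []
    else if PySem.Int.band cw 2147483648 ≠ 0 then pvBits20 cw else [])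

-- the low k bits of a natural number, LSB first, as a list of 0/1 integers
def pvBitsN (b k : Nat) : List Int :=
  (List.range k).map (fun i => (((b >>> i) &&& 1 : Nat) : Int))

-- common specification: consume the bit stream 7 bits at a time
def pvVal7 (bs : List Int) : Int :=
  (List.range 7).foldl (fun cv (j : Nat) => PySem.Int.bor cv ((bs.getD j 0) <<< j)) 0

def pvChunk (bs : List Int) (cs : List Char) : List Char :=
  if _h : 7 ≤ bs.length then
    let v := pvVal7 bs
    if v = 0 then cs
    else pvChunk (bs.drop 7) (if 32 ≤ v ∧ v < 127 then cs ++ [Char.ofNat v.toNat] else cs)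
  else cs
termination_by bs.length
decreasing_by simp; omega

theorem pvBitsN_length (b k : Nat) : (pvBitsN b k).length = k := by
  simp [pvBitsN]

theorem pvChunk_short (bs : List Int) (cs : List Char) (h : bs.length < 7) :
    pvChunk bs cs = cs := by
  rw [pvChunk]; rw [dif_neg]; omega

theorem pvPush_ofList (cs : List Char) (c : Char) :
    (String.ofList cs).push c = String.ofList (cs ++ [c]) := by
  apply String.ext; simp

-- A's phase-1 foldl builds exactly pvAllBits
theorem pvFoldl_allBits (l : List Int) (acc : List Int) :
    l.foldl (fun acc cw =>
      if cw = 2056634775 then acc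
      else if PySem.Int.band cw 2147483648 ≠ 0 then
        acc ++ (List.range 20).map (fun (i : Nat) => PySem.Int.band ((PySem.Int.band (cw >>> 11) 1048575) >>> i) 1)
      else acc) acc = acc ++ pvAllBits l := by
  induction l generalizing acc with
  | nil => simp [pvAllBits]
  | cons cw rest ih =>
    rw [List.foldl_cons]
    show List.foldl _ (if cw = 2056634775 then acc
      else if PySem.Int.band cw 2147483648 ≠ 0 then acc ++ pvBits20 cw else acc) rest = _
    have hall : pvAllBits (cw :: rest) = (if cw = 2056634775 then []
        else if PySem.Int.band cw 2147483648 ≠ 0 then pvBits20 cw else []) ++ pvAllBits rest := by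
      simp [pvAllBits]
    rw [hall]
    by_cases h1 : cw = 2056634775
    · rw [if_pos h1, if_pos h1, ih]; simp
    · by_cases h2 : PySem.Int.band cw 2147483648 ≠ 0
      · rw [if_neg h1, if_neg h1, if_pos h2, if_pos h2, ih, List.append_assoc]
      · rw [if_neg h1, if_neg h1, if_neg h2, if_neg h2, ih]; simp

theorem pvGetD_drop (l : List Int) (i j : Nat) :
    (l.drop i).getD j 0 = l.getD (i + j) 0 := by
  simp [List.getD, List.getElem?_drop]

-- A's phase-2 loop is pvChunk on the dropped suffix
theorem pvLoopA_chunk (n : Nat) : ∀ (bits : List Int) (i : Nat) (cs : List Char),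
    bits.length - i ≤ n →
    pvLoopA bits i (String.ofList cs) = String.ofList (pvChunk (bits.drop i) cs) := by
  induction n with
  | zero =>
    intro bits i cs hn
    rw [pvLoopA, dif_neg (by omega), pvChunk_short _ _ (by simp; omega)]
  | succ n ih =>
    intro bits i cs hn
    by_cases hc : i + 7 ≤ bits.length
    · rw [pvLoopA, dif_pos hc, pvChunk, dif_pos (by simp; omega)]
      have hval : pvVal7 (bits.drop i) =
          (List.range 7).foldl (fun cv (j : Nat) => PySem.Int.bor cv ((bits.getD (i + j) 0) <<< j)) 0 := by
        simp only [pvVal7, pvGetD_drop]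
      rw [← hval]
      by_cases hz : pvVal7 (bits.drop i) = 0
      · rw [if_pos hz, if_pos hz]
      · rw [if_neg hz, if_neg hz]
        by_cases hr : 32 ≤ pvVal7 (bits.drop i) ∧ pvVal7 (bits.drop i) < 127
        · rw [if_pos hr, if_pos hr, pvPush_ofList, ih bits (i + 7) _ (by omega), List.drop_drop]
        · rw [if_neg hr, if_neg hr, ih bits (i + 7) _ (by omega), List.drop_drop]
    · rw [pvLoopA, dif_neg hc, pvChunk_short _ _ (by simp; omega)]

-- bounds for Python's masking of a possibly negative int by a nonnegative mask
theorem pvBand_mask_bounds (a m : Int) (hm : 0 ≤ m) :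
    0 ≤ PySem.Int.band a m ∧ PySem.Int.band a m ≤ m := by
  unfold PySem.Int.band
  have hmn : ((m.toNat : Int)) = m := Int.toNat_of_nonneg hm
  by_cases h1 : (0 : Int) ≤ a
  · rw [if_pos h1, if_pos hm]
    have hx : a.toNat &&& m.toNat ≤ m.toNat := Nat.and_le_right
    omega
  · rw [if_neg h1, if_pos hm]
    have hx : m.toNat - (m.toNat &&& (-a - 1).toNat) ≤ m.toNat := Nat.sub_le _ _
    omega

theorem pvBitEntry (y i : Nat) : (y >>> i) &&& 1 = if y.testBit i then 1 else 0 := by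
  rcases Nat.mod_two_eq_zero_or_one (y >>> i) with h | h <;>
    simp [Nat.testBit, Nat.and_one_is_mod, h]

-- one message codeword contributes the 20 low bits of its (nonnegative) data value
theorem pvBits20_eq (cw : Int) :
    pvBits20 cw = pvBitsN (PySem.Int.band (cw >>> 11) 1048575).toNat 20 := by
  have hd := pvBand_mask_bounds (cw >>> 11) 1048575 (by norm_num)
  have hcast : PySem.Int.band (cw >>> 11) 1048575 = ((PySem.Int.band (cw >>> 11) 1048575).toNat : Int) :=
    (Int.toNat_of_nonneg hd.1).symm
  unfold pvBits20 pvBitsN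
  refine List.map_congr_left fun i _ => ?_
  rw [hcast, ← Int.natCast_shiftRight]
  exact_mod_cast PySem.Int.band_natCast _ 1

-- appending 20 fresh bits on top of cnt pending ones
theorem pvBitsN_append (b n cnt : Nat) (hb : b < 2 ^ cnt) :
    pvBitsN (b ||| (n <<< cnt)) (cnt + 20) = pvBitsN b cnt ++ pvBitsN n 20 := by
  apply List.ext_getElem
  · simp [pvBitsN]
  · intro i h1 h2
    simp only [pvBitsN, List.getElem_map, List.getElem_range] at *
    by_cases hi : i < cnt
    · rw [List.getElem_append_left (by simpa [pvBitsN] using hi)]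
      simp only [List.getElem_map, List.getElem_range]
      have : (b ||| (n <<< cnt)).testBit i = b.testBit i := by
        simp [Nat.testBit_or, Nat.testBit_shiftLeft, show ¬ cnt ≤ i by omega]
      rw [pvBitEntry, pvBitEntry, this]
    · rw [List.getElem_append_right (by simp; omega)]
      simp only [List.getElem_map, List.getElem_range, List.length_map, List.length_range]
      have hbi : b.testBit i = false := Nat.testBit_lt_two_pow (by
        calc b < 2 ^ cnt := hb
        _ ≤ 2 ^ i := Nat.pow_le_pow_right (by norm_num) (by omega))
      have : (b ||| (n <<< cnt)).testBit i = n.testBit (i - cnt) := by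
        simp [Nat.testBit_or, Nat.testBit_shiftLeft, show cnt ≤ i by omega, hbi]
      rw [pvBitEntry, pvBitEntry, this]

theorem pvBitsN_drop (b cnt : Nat) :
    (pvBitsN b cnt).drop 7 = pvBitsN (b >>> 7) (cnt - 7) := by
  apply List.ext_getElem
  · simp [pvBitsN]
  · intro i h1 h2
    rw [List.getElem_drop]
    simp only [pvBitsN, List.getElem_map, List.getElem_range]
    rw [← Nat.shiftRight_add]

-- the OR-accumulation of the k low bits recovers the value mod 2^k
theorem pvFoldOr (k : Nat) (b : Nat) :
    (List.range k).foldl (fun v j => v ||| (((b >>> j) &&& 1) <<< j)) 0 = b % 2 ^ k := by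
  induction k with
  | zero => simp [Nat.mod_one]
  | succ k ih =>
    rw [List.range_succ, List.foldl_append, ih, List.foldl_cons, List.foldl_nil]
    apply Nat.eq_of_testBit_eq
    intro i
    simp only [Nat.testBit_or, Nat.testBit_shiftLeft, Nat.testBit_mod_two_pow, Nat.testBit_and,
      Nat.testBit_shiftRight, show (1 : Nat) = 2 ^ 0 from rfl, Nat.testBit_two_pow]
    rcases Nat.lt_trichotomy i k with h | h | h
    · simp [show i < k by omega, show i < k + 1 by omega, show ¬ k ≤ i by omega]
    · subst h
      simp [show i < i + 1 by omega]
    · simp [show ¬ i < k by omega, show ¬ i < k + 1 by omega, show k ≤ i by omega,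
        show ¬ (0 = i - k) by omega]

-- an Int fold of casts is the cast of the Nat fold
theorem pvCastFold (g : Nat → Nat) (k : Nat) :
    (List.range k).foldl (fun cv (j : Nat) => PySem.Int.bor cv (((g j : Nat) : Int) <<< j)) ((0 : Nat) : Int)
      = (((List.range k).foldl (fun cv j => cv ||| (g j <<< j)) 0 : Nat) : Int) := by
  generalize (0 : Nat) = m
  induction k generalizing m with
  | zero => simp
  | succ k ih =>
    simp only [List.range_succ, List.foldl_append, List.foldl_cons, List.foldl_nil]
    rw [ih, ← Int.natCast_shiftLeft]
    exact PySem.Int.bor_natCast _ _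

theorem pvGetD_range_map (j : Nat) (f : Nat → Int) (k : Nat) (h : j < k) :
    ((List.range k).map f).getD j 0 = f j := by
  simp [List.getD, h]

-- the 7-bit value read off the head of the stream is the buffer's low byte
theorem pvVal7_bitsN (b cnt : Nat) (fut : List Int) (h : 7 ≤ cnt) :
    pvVal7 (pvBitsN b cnt ++ fut) = ((b % 128 : Nat) : Int) := by
  have e : ∀ j, j < 7 → (pvBitsN b cnt ++ fut).getD j 0 = (((b >>> j) &&& 1 : Nat) : Int) := by
    intro j hj
    rw [List.getD, List.getElem?_append_left (by simp [pvBitsN]; omega)]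
    rw [← List.getD, pvBitsN, pvGetD_range_map _ _ _ (by omega)]
  have expand : pvVal7 (pvBitsN b cnt ++ fut) =
      (List.range 7).foldl (fun cv (j : Nat) =>
        PySem.Int.bor cv (((((b >>> j) &&& 1 : Nat) : Int)) <<< j)) ((0 : Nat) : Int) := by
    unfold pvVal7
    rw [show List.range 7 = [0, 1, 2, 3, 4, 5, 6] from rfl]
    simp only [List.foldl_cons, List.foldl_nil,
      e 0 (by omega), e 1 (by omega), e 2 (by omega), e 3 (by omega),
      e 4 (by omega), e 5 (by omega), e 6 (by omega)]
    norm_num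
  rw [expand, pvCastFold, pvFoldOr]
  norm_num

theorem pvAnd127 (b : Nat) : b &&& 127 = b % 128 := by
  have := Nat.and_two_pow_sub_one_eq_mod b 7
  norm_num at this
  omega

-- one chunk step of the stream, as performed by the drain loop
theorem pvChunk_step (b cnt : Nat) (fut : List Int) (cs : List Char)
    (h7 : 7 ≤ cnt) (hz : ¬ b &&& 127 = 0) :
    pvChunk (pvBitsN b cnt ++ fut) cs =
      pvChunk (pvBitsN (b >>> 7) (cnt - 7) ++ fut)
        (if 32 ≤ ((b &&& 127 : Nat) : Int) ∧ ((b &&& 127 : Nat) : Int) < 127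
         then cs ++ [Char.ofNat (b &&& 127)] else cs) := by
  rw [pvChunk, dif_pos (by simp [pvBitsN]; omega)]
  have hv : pvVal7 (pvBitsN b cnt ++ fut) = ((b &&& 127 : Nat) : Int) := by
    rw [pvVal7_bitsN b cnt fut h7, pvAnd127]
  rw [hv]
  rw [if_neg (by exact_mod_cast hz)]
  rw [List.drop_append_of_le_length (by simp [pvBitsN]; omega), pvBitsN_drop]
  simp

-- the drain loop tracks pvChunk
theorem pvDrainB_spec : ∀ (cnt : Nat) (b : Nat) (cs : List Char), b < 2 ^ cnt →
    (match pvDrainB (b : Int) cnt cs with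
     | Sum.inl (buf', cnt', cs') => ∃ b' : Nat, buf' = (b' : Int) ∧ b' < 2 ^ cnt' ∧ cnt' < 7 ∧
         ∀ fut, pvChunk (pvBitsN b cnt ++ fut) cs = pvChunk (pvBitsN b' cnt' ++ fut) cs'
     | Sum.inr cs' => ∀ fut, pvChunk (pvBitsN b cnt ++ fut) cs = cs') := by
  intro cnt
  induction cnt using Nat.strong_induction_on with
  | _ cnt ih =>
    intro b cs hb
    rw [pvDrainB]
    by_cases h7 : 7 ≤ cnt
    · rw [dif_pos h7]
      have hch : PySem.Int.band (b : Int) 127 = ((b &&& 127 : Nat) : Int) := by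
        exact_mod_cast PySem.Int.band_natCast b 127
      simp only [hch]
      by_cases hz : b &&& 127 = 0
      · rw [if_pos (by exact_mod_cast hz)]
        intro fut
        rw [pvChunk, dif_pos (by simp [pvBitsN]; omega)]
        rw [if_pos (by rw [pvVal7_bitsN b cnt fut h7, ← pvAnd127]; exact_mod_cast hz)]
      · rw [if_neg (by exact_mod_cast hz)]
        have hsr : ((b : Int) >>> 7) = ((b >>> 7 : Nat) : Int) := (Int.natCast_shiftRight b 7).symm
        rw [hsr]
        have hcs : (if 32 ≤ ((b &&& 127 : Nat) : Int) ∧ ((b &&& 127 : Nat) : Int) < 127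
              then cs ++ [Char.ofNat ((((b &&& 127 : Nat) : Int)).toNat)] else cs)
            = (if 32 ≤ ((b &&& 127 : Nat) : Int) ∧ ((b &&& 127 : Nat) : Int) < 127
              then cs ++ [Char.ofNat (b &&& 127)] else cs) := by
          split_ifs with hc
          · simp
          · rfl
        rw [hcs]
        set csN := (if 32 ≤ ((b &&& 127 : Nat) : Int) ∧ ((b &&& 127 : Nat) : Int) < 127
              then cs ++ [Char.ofNat (b &&& 127)] else cs)
        have hb' : b >>> 7 < 2 ^ (cnt - 7) := by
          rw [Nat.shiftRight_eq_div_pow]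
          apply Nat.div_lt_of_lt_mul
          calc b < 2 ^ cnt := hb
          _ = 2 ^ (cnt - 7) * 2 ^ 7 := by rw [← Nat.pow_add]; congr 1; omega
          _ = 2 ^ 7 * 2 ^ (cnt - 7) := Nat.mul_comm _ _
        have IH := ih (cnt - 7) (by omega) (b >>> 7) csN hb'
        cases hrec : pvDrainB ((b >>> 7 : Nat) : Int) (cnt - 7) csN with
        | inl p =>
          rw [hrec] at IH
          obtain ⟨buf', cnt', cs'⟩ := p
          obtain ⟨b', hbuf, hb2, hc7, hfut⟩ := IH
          exact ⟨b', hbuf, hb2, hc7, fun fut => (pvChunk_step b cnt fut cs h7 hz).trans (hfut fut)⟩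
        | inr cs' =>
          rw [hrec] at IH
          exact fun fut => (pvChunk_step b cnt fut cs h7 hz).trans (IH fut)
    · rw [dif_neg h7]
      exact ⟨b, rfl, hb, by omega, fun fut => rfl⟩

-- the streaming pass computes the chunked decoding of the remaining bit stream
theorem pvGoB_spec (rest : List Int) : ∀ (b cnt : Nat) (cs : List Char),
    b < 2 ^ cnt → cnt < 7 →
    pvGoB rest (b : Int) cnt cs =
      PySem.Str.strip (String.ofList (pvChunk (pvBitsN b cnt ++ pvAllBits rest) cs)) := by
  induction rest with
  | nil =>
    intro b cnt cs _ h7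
    rw [pvGoB]
    rw [show pvAllBits [] = [] from rfl, List.append_nil,
      pvChunk_short _ _ (by rw [pvBitsN_length]; omega)]
  | cons cw rest ih =>
    intro b cnt cs hb h7
    rw [pvGoB]
    by_cases hskip : cw = 2056634775 ∨ PySem.Int.band cw 2147483648 = 0
    · rw [if_pos hskip]
      have hall : pvAllBits (cw :: rest) = pvAllBits rest := by
        rcases hskip with h | h
        · simp [pvAllBits, h]
        · simp [pvAllBits, h]
      rw [hall]
      exact ih b cnt cs hb h7
    · rw [if_neg hskip]
      rw [not_or] at hskip
      obtain ⟨hne, hband⟩ := hskip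
      set n : Nat := (PySem.Int.band (cw >>> 11) 1048575).toNat with hn
      have hd := pvBand_mask_bounds (cw >>> 11) 1048575 (by norm_num)
      have hdc : PySem.Int.band (cw >>> 11) 1048575 = (n : Int) := (Int.toNat_of_nonneg hd.1).symm
      have hbor : PySem.Int.bor (b : Int) (PySem.Int.band (cw >>> 11) 1048575 <<< cnt)
          = ((b ||| (n <<< cnt) : Nat) : Int) := by
        rw [hdc, ← Int.natCast_shiftLeft]
        exact PySem.Int.bor_natCast _ _
      rw [hbor]
      have hall : pvAllBits (cw :: rest) = pvBitsN n 20 ++ pvAllBits rest := by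
        have : pvAllBits (cw :: rest) = pvBits20 cw ++ pvAllBits rest := by
          simp [pvAllBits, hne, hband]
        rw [this, pvBits20_eq, ← hn]
      have hbits : pvBitsN b cnt ++ pvAllBits (cw :: rest)
          = pvBitsN (b ||| (n <<< cnt)) (cnt + 20) ++ pvAllBits rest := by
        rw [hall, pvBitsN_append b n cnt hb, List.append_assoc]
      have hb2 : b ||| (n <<< cnt) < 2 ^ (cnt + 20) := by
        apply Nat.or_lt_two_pow
        · calc b < 2 ^ cnt := hb
          _ ≤ 2 ^ (cnt + 20) := Nat.pow_le_pow_right (by norm_num) (by omega)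
        · have hn20 : n < 2 ^ 20 := by
            have : (n : Int) ≤ 1048575 := by rw [← hdc]; exact hd.2
            have : n ≤ 1048575 := by exact_mod_cast this
            omega
          calc n <<< cnt = n * 2 ^ cnt := Nat.shiftLeft_eq n cnt
          _ < 2 ^ 20 * 2 ^ cnt := mul_lt_mul_of_pos_right hn20 (Nat.two_pow_pos cnt)
          _ = 2 ^ (cnt + 20) := by rw [← Nat.pow_add]; congr 1; omega
      have HD := pvDrainB_spec (cnt + 20) (b ||| (n <<< cnt)) cs hb2
      cases hrec : pvDrainB ((b ||| (n <<< cnt) : Nat) : Int) (cnt + 20) cs with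
      | inl p =>
        rw [hrec] at HD
        obtain ⟨buf', cnt', cs'⟩ := p
        obtain ⟨b', hbuf, hb', hc7, hfut⟩ := HD
        show pvGoB rest buf' cnt' cs' =
          PySem.Str.strip (String.ofList (pvChunk (pvBitsN b cnt ++ pvAllBits (cw :: rest)) cs))
        rw [hbuf, ih b' cnt' cs' hb' hc7, hbits, hfut (pvAllBits rest)]
      | inr cs' =>
        rw [hrec] at HD
        show PySem.Str.strip (String.ofList cs') =
          PySem.Str.strip (String.ofList (pvChunk (pvBitsN b cnt ++ pvAllBits (cw :: rest)) cs))
        rw [hbits, HD (pvAllBits rest)]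

-- ===== VERDICT (by name: the statement is the Claim_ definition above) =====
theorem decode_alpha_message_spec : Claim_equal_decode_alpha_message := by
  intro codewords _
  unfold Spec_decode_alpha_message decode_alpha_message_alt
  simp only [decode_alpha_message]
  rw [pvFoldl_allBits codewords [], List.nil_append]
  have hA := pvLoopA_chunk (pvAllBits codewords).length (pvAllBits codewords) 0 [] (by omega)
  simp only [List.drop_zero] at hA
  have hB := pvGoB_spec codewords 0 0 [] (by norm_num) (by norm_num)
  rw [show ((0 : Nat) : Int) = (0 : Int) from rfl,
    show pvBitsN 0 0 = [] from rfl, List.nil_append] at hB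
  rw [hB, show ("" : String) = String.ofList [] from rfl, hA]
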